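-- pv_equiv track=rewrite | github.com/skvcool-rgb/KOS-Organism | kos/grid_primitives.py | outline_objects
-- ===== SOURCE A (Python) =====
-- from typing import Any, Callable, Dict, List, Tuple
-- from collections import Counter
--
-- Grid = List[List[int]]
--
-- def color_counts(g: Grid) -> Counter:
--     return Counter(c for row in g for c in row)
--
-- def outline_objects(g: Grid) -> Grid:
--     """Keep only the outline/boundary of each colored object."""
--     if not g or not g[0]: return g
--     rows, cols = len(g), len(g[0])
--     counts = color_counts(g)
--     bg = counts.most_common(1)[0][0]
--     result = [[bg]*cols for _ in range(rows)]
--     for i in range(rows):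
--         for j in range(cols):
--             if g[i][j] != bg:
--                 is_edge = False
--                 for di, dj in [(-1,0),(1,0),(0,-1),(0,1)]:
--                     ni, nj = i+di, j+dj
--                     if ni < 0 or ni >= rows or nj < 0 or nj >= cols or g[ni][nj] != g[i][j]:
--                         is_edge = True; break
--                 if is_edge:
--                     result[i][j] = g[i][j]
--     return result
-- ===== SOURCE B (Python) =====
-- from collections import Counter
--
--
-- def outline_objects(g):
--     """Keep only the outline/boundary of each colored object."""
--     if not g or not g[0]:
--         return g
--     rows, cols = len(g), len(g[0])
--     bg = Counter(c for row in g for c in row).most_common(1)[0][0]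
--     result = [[bg] * cols for _ in range(rows)]
--     # non-background cells on the outer border are always boundary
--     for i in (0, rows - 1):
--         for j in range(cols):
--             if g[i][j] != bg:
--                 result[i][j] = g[i][j]
--     for i in range(rows):
--         for j in (0, cols - 1):
--             if g[i][j] != bg:
--                 result[i][j] = g[i][j]
--     # one pass over horizontal neighbour pairs, one over vertical pairs
--     for i in range(rows):
--         for j in range(cols - 1):
--             a, b = g[i][j], g[i][j + 1]
--             if a != b:
--                 if a != bg:
--                     result[i][j] = a
--                 if b != bg:
--                     result[i][j + 1] = b
--     for i in range(rows - 1):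
--         for j in range(cols):
--             a, b = g[i][j], g[i + 1][j]
--             if a != b:
--                 if a != bg:
--                     result[i][j] = a
--                 if b != bg:
--                     result[i + 1][j] = b
--     return result
-- ===== Notes on version B (the rewrite author's own statement) =====
-- stated objective: alternative
-- what changed: Replaces A's per-cell scan with a break-out 4-direction neighbour loop by an edge-centered traversal: mark non-background border cells, then one pass over horizontal adjacent pairs and one over vertical adjacent pairs, copying each non-background cell of a differing pair.
import Mathlib
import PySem

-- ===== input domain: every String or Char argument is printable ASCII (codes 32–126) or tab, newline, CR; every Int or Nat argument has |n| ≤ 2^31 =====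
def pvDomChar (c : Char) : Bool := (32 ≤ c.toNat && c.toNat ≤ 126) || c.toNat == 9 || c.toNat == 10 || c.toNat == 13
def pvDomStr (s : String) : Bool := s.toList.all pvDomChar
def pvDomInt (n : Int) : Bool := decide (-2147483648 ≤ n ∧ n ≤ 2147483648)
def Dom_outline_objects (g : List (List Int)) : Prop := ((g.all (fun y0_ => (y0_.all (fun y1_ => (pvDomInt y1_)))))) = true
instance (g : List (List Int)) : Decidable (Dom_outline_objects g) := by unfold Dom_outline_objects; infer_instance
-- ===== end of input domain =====

-- B replaces A's per-cell 4-neighbour scan (with break) by an edge-centered traversal: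
-- mark non-background border cells, then one pass over horizontal adjacent pairs and one
-- over vertical adjacent pairs (objective: alternative decomposition, same cost).

-- ===== PORT A =====
-- g[i][j]; under Pre_ every index used by either program is in range, so the defaults are never hit
def pvCell (g : List (List Int)) (i j : Int) : Int :=
  PySem.List.pyGetD (PySem.List.pyGetD g i []) j 0

-- result[i][j] = v; callers only pass 0 ≤ i < len(result), 0 ≤ j < row length
def pvSet2 (r : List (List Int)) (i j : Int) (v : Int) : List (List Int) :=
  r.set i.toNat ((r.getD i.toNat []).set j.toNat v)

-- helper color_counts: Counter(c for row in g for c in row)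
def pvColorCounts (g : List (List Int)) : PySem.Dict Int Int :=
  PySem.Dict.counter (g.flatMap (fun row => row))

-- counts.most_common(1)[0][0]: first item of maximal count (heapq.nlargest keeps the
-- first-encountered among ties, i.e. PySem.List.max?'s first extremal element)
def pvBg (g : List (List Int)) : Int :=
  ((PySem.List.max? (pvColorCounts g).items (fun p => p.2)).getD (0, 0)).1

def outline_objects (g : List (List Int)) : List (List Int) :=
  if g = [] ∨ g.headD [] = [] then g else
  let rows : Int := g.length
  let cols : Int := (g.headD []).length
  let bg : Int := pvBg g
  let init := List.replicate rows.toNat (List.replicate cols.toNat bg)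
  (PySem.List.pyRange 0 rows 1).foldl (fun result i =>
    (PySem.List.pyRange 0 cols 1).foldl (fun result j =>
      if pvCell g i j ≠ bg then
        let isEdge := [((-1 : Int), (0 : Int)), (1, 0), (0, -1), (0, 1)].any (fun d =>
          let ni := i + d.1
          let nj := j + d.2
          decide (ni < 0) || decide (rows ≤ ni) || decide (nj < 0) || decide (cols ≤ nj) ||
            decide (pvCell g ni nj ≠ pvCell g i j))
        if isEdge then pvSet2 result i j (pvCell g i j) else result
      else result) result) init

-- ===== PORT B =====
def outline_objects_alt (g : List (List Int)) : List (List Int) :=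
  if g = [] ∨ g.headD [] = [] then g else
  let rows : Int := g.length
  let cols : Int := (g.headD []).length
  let bg : Int := pvBg g
  let r0 := List.replicate rows.toNat (List.replicate cols.toNat bg)
  -- non-background cells on the outer border are always boundary
  let r1 := [(0 : Int), rows - 1].foldl (fun result i =>
    (PySem.List.pyRange 0 cols 1).foldl (fun result j =>
      if pvCell g i j ≠ bg then pvSet2 result i j (pvCell g i j) else result) result) r0
  let r2 := (PySem.List.pyRange 0 rows 1).foldl (fun result i =>
    [(0 : Int), cols - 1].foldl (fun result j =>
      if pvCell g i j ≠ bg then pvSet2 result i j (pvCell g i j) else result) result) r1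
  -- one pass over horizontal neighbour pairs, one over vertical pairs
  let r3 := (PySem.List.pyRange 0 rows 1).foldl (fun result i =>
    (PySem.List.pyRange 0 (cols - 1) 1).foldl (fun result j =>
      let a := pvCell g i j
      let b := pvCell g i (j + 1)
      if a ≠ b then
        let result := if a ≠ bg then pvSet2 result i j a else result
        if b ≠ bg then pvSet2 result i (j + 1) b else result
      else result) result) r2
  (PySem.List.pyRange 0 (rows - 1) 1).foldl (fun result i =>
    (PySem.List.pyRange 0 cols 1).foldl (fun result j =>
      let a := pvCell g i j
      let b := pvCell g (i + 1) j
      if a ≠ b then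
        let result := if a ≠ bg then pvSet2 result i j a else result
        if b ≠ bg then pvSet2 result (i + 1) j b else result
      else result) result) r3

-- ===== PRECONDITION & SPEC =====
-- Pre_ excludes exactly the grids in which some row is shorter than the first row:
-- there both Pythons raise IndexError (A at g[i][j] for j < len(g[0])).
def Pre_outline_objects (g : List (List Int)) : Prop :=
  g = [] ∨ g.headD [] = [] ∨ ∀ row ∈ g, (g.headD []).length ≤ row.length
instance (g : List (List Int)) : Decidable (Pre_outline_objects g) := by
  unfold Pre_outline_objects; infer_instance
def pvWitness_outline_objects : List (List Int) := [[1, 2], [2, 2]]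

def Spec_outline_objects (g : List (List Int)) (out : List (List Int)) : Prop := out = outline_objects_alt g
instance (g : List (List Int)) (out : List (List Int)) : Decidable (Spec_outline_objects g out) := by unfold Spec_outline_objects; infer_instance

-- ===== CLAIM (what is proved, stated in full; the proofs are below) =====
def Claim_equal_outline_objects : Prop := ∀ (g : List (List Int)), Dom_outline_objects g → Pre_outline_objects g → Spec_outline_objects g (outline_objects g)

-- ===== LEMMAS AND PROOFS =====

-- shape of a result grid
def pvShape (r : List (List Int)) (rows cols : Nat) : Prop :=
  r.length = rows ∧ ∀ row ∈ r, row.length = cols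

-- result cell read with Nat indices
def pvGetC (r : List (List Int)) (i j : Nat) : Int := (r.getD i []).getD j 0

-- the canonical boundary predicate both results compute
def pvKeep (g : List (List Int)) (i j : Nat) : Bool :=
  let bg := pvBg g
  let c := pvCell g i j
  decide (c ≠ bg) &&
    (decide (i = 0) || decide (i + 1 = g.length) || decide (j = 0) ||
     decide (j + 1 = (g.headD []).length) ||
     decide (pvCell g ((i : Int) - 1) j ≠ c) || decide (pvCell g ((i : Int) + 1) j ≠ c) ||
     decide (pvCell g i ((j : Int) - 1) ≠ c) || decide (pvCell g i ((j : Int) + 1) ≠ c))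

theorem pvShape_set2 (r : List (List Int)) (rows cols : Nat) (a b : Int) (v : Int)
    (hr : pvShape r rows cols) (ha : 0 ≤ a) (ha2 : a < (rows : Int)) :
    pvShape (pvSet2 r a b v) rows cols := by
  obtain ⟨hlen, hrows⟩ := hr
  have han : a.toNat < r.length := by omega
  constructor
  · simpa [pvSet2] using hlen
  · intro row hrow
    rcases List.mem_or_eq_of_mem_set hrow with h | h
    · exact hrows row h
    · subst h
      rw [List.getD_eq_getElem r [] han, List.length_set]
      exact hrows _ (List.getElem_mem han)

theorem pvGetC_set2 (r : List (List Int)) (rows cols : Nat) (a b : Int) (v : Int)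
    (hr : pvShape r rows cols) (ha : 0 ≤ a) (ha2 : a < (rows : Int))
    (hb : 0 ≤ b) (hb2 : b < (cols : Int)) (i j : Nat) (hi : i < rows) (hj : j < cols) :
    pvGetC (pvSet2 r a b v) i j = if a = (i : Int) ∧ b = (j : Int) then v else pvGetC r i j := by
  obtain ⟨hlen, hrows⟩ := hr
  have han : a.toNat < r.length := by omega
  have hilen : i < r.length := by omega
  have hrowlen : (r.getD a.toNat []).length = cols := by
    rw [List.getD_eq_getElem r [] han]; exact hrows _ (List.getElem_mem han)
  have hbn : b.toNat < (r.getD a.toNat []).length := by omega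
  have hri? : r[i]? = some r[i] := List.getElem?_eq_getElem hilen
  have hrilen : r[i].length = cols := hrows _ (List.getElem_mem hilen)
  unfold pvGetC pvSet2
  simp only [List.getD_eq_getElem?_getD, List.getElem?_set]
  by_cases hai : a.toNat = i
  · simp only [hai, if_pos hilen]
    by_cases hbj : b.toNat = j
    · rw [if_pos (by omega : a = (i : Int) ∧ b = (j : Int))]
      simp [hbj, hri?, hrilen, hj]
    · simp [hri?, hrilen, hj, hbj]
      intro _ h2
      exact absurd (show b.toNat = j by omega) hbj
  · rw [if_neg hai, if_neg (by omega), hri?]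

theorem pvFoldl_shape {α : Type} (l : List α) (step : List (List Int) → α → List (List Int))
    (rows cols : Nat)
    (hpres : ∀ r e, e ∈ l → pvShape r rows cols → pvShape (step r e) rows cols)
    (r : List (List Int)) (hr : pvShape r rows cols) :
    pvShape (l.foldl step r) rows cols := by
  induction l generalizing r with
  | nil => exact hr
  | cons e t ih =>
    exact ih (fun r' e' he' h => hpres r' e' (List.mem_cons_of_mem _ he') h)
      _ (hpres r e (List.mem_cons_self) hr)

theorem pvFoldl_char {α : Type} (l : List α) (step : List (List Int) → α → List (List Int))
    (rows cols : Nat) (cell : Nat → Nat → Int) (w : α → Nat → Nat → Bool)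
    (hpres : ∀ r e, e ∈ l → pvShape r rows cols → pvShape (step r e) rows cols)
    (hstep : ∀ r e i j, e ∈ l → pvShape r rows cols → i < rows → j < cols →
      pvGetC (step r e) i j = if w e i j then cell i j else pvGetC r i j)
    (r : List (List Int)) (hr : pvShape r rows cols) (i j : Nat) (hi : i < rows) (hj : j < cols) :
    pvGetC (l.foldl step r) i j =
      if l.any (fun e => w e i j) then cell i j else pvGetC r i j := by
  induction l generalizing r with
  | nil => simp
  | cons e t ih =>
    have h1 := ih (fun r' e' he' h => hpres r' e' (List.mem_cons_of_mem _ he') h)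
      (fun r' e' i' j' he' h hi' hj' => hstep r' e' i' j' (List.mem_cons_of_mem _ he') h hi' hj')
      _ (hpres r e (List.mem_cons_self) hr)
    have h2 := hstep r e i j (List.mem_cons_self) hr hi hj
    simp only [List.foldl_cons, List.any_cons, h1, h2]
    by_cases hw : w e i j = true <;> by_cases ht : (t.any fun e => w e i j) = true <;>
      simp [hw, ht]

theorem pvShape_write (r : List (List Int)) (rows cols : Nat) (c : Prop) [Decidable c]
    (a b v : Int) (hr : pvShape r rows cols) (ha : 0 ≤ a) (ha2 : a < (rows : Int)) :
    pvShape (if c then pvSet2 r a b v else r) rows cols := by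
  by_cases hc : c
  · rw [if_pos hc]; exact pvShape_set2 r rows cols a b v hr ha ha2
  · rw [if_neg hc]; exact hr

theorem pvGetC_writeCell (g : List (List Int)) (r : List (List Int)) (rows cols : Nat)
    (c : Prop) [Decidable c] (a b : Int) (hr : pvShape r rows cols)
    (ha : 0 ≤ a) (ha2 : a < (rows : Int)) (hb : 0 ≤ b) (hb2 : b < (cols : Int))
    (i j : Nat) (hi : i < rows) (hj : j < cols) :
    pvGetC (if c then pvSet2 r a b (pvCell g a b) else r) i j =
      if c ∧ a = (i : Int) ∧ b = (j : Int) then pvCell g i j else pvGetC r i j := by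
  by_cases hc : c
  · rw [if_pos hc, pvGetC_set2 r rows cols a b _ hr ha ha2 hb hb2 i j hi hj]
    by_cases hab : a = (i : Int) ∧ b = (j : Int)
    · obtain ⟨h1, h2⟩ := hab
      rw [h1, h2]
      simp [hc]
    · rw [if_neg hab, if_neg (fun h => hab ⟨h.2.1, h.2.2⟩)]
  · rw [if_neg hc, if_neg (fun h => hc h.1)]

theorem pvGetC_init (R C : Nat) (bg : Int) (i j : Nat) (hi : i < R) (hj : j < C) :
    pvGetC (List.replicate R (List.replicate C bg)) i j = bg := by
  unfold pvGetC
  rw [List.getD_eq_getElem _ [] (by simpa using hi), List.getElem_replicate,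
    List.getD_eq_getElem _ 0 (by simpa using hj), List.getElem_replicate]

theorem pvIte_or (p q : Prop) [Decidable p] [Decidable q] (x y : Int) :
    (if p then x else if q then x else y) = if p ∨ q then x else y := by
  split_ifs <;> tauto

-- A's 4-direction edge test, as in the port
def pvEdge (g : List (List Int)) (ii jj : Int) : Bool :=
  [((-1 : Int), (0 : Int)), (1, 0), (0, -1), (0, 1)].any (fun d =>
    decide (ii + d.1 < 0) || decide ((g.length : Int) ≤ ii + d.1) || decide (jj + d.2 < 0) ||
      decide (((g.headD []).length : Int) ≤ jj + d.2) ||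
      decide (pvCell g (ii + d.1) (jj + d.2) ≠ pvCell g ii jj))

theorem pvCharA (g : List (List Int))
    (hne : ¬(g = [] ∨ g.headD [] = []))
    (i j : Nat) (hi : i < g.length) (hj : j < (g.headD []).length) :
    pvGetC (outline_objects g) i j =
      if (PySem.List.pyRange 0 (g.length : Int) 1).any (fun ii =>
          (PySem.List.pyRange 0 ((g.headD []).length : Int) 1).any (fun jj =>
            decide ((pvCell g ii jj ≠ pvBg g ∧ pvEdge g ii jj = true) ∧ ii = (i : Int) ∧ jj = (j : Int))))
      then pvCell g i j else pvBg g := by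
  unfold outline_objects
  rw [if_neg hne]
  dsimp only
  refine Eq.trans (pvFoldl_char (PySem.List.pyRange 0 (g.length : Int) 1) _ g.length
    (g.headD []).length (fun i j => pvCell g i j)
    (fun ii i j => (PySem.List.pyRange 0 ((g.headD []).length : Int) 1).any (fun jj =>
      decide ((pvCell g ii jj ≠ pvBg g ∧ pvEdge g ii jj = true) ∧ ii = (i : Int) ∧ jj = (j : Int))))
    ?hpres ?hstep _ ?hinit i j hi hj) ?base
  case base =>
    rw [pvGetC_init ((g.length : Int)).toNat (((g.headD []).length : Int)).toNat (pvBg g) i j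
      (by omega) (by omega)]
  case hinit =>
    constructor
    · simp
    · intro row h
      rw [List.eq_of_mem_replicate h]
      simp
  case hpres =>
    intro r ii hmem hsh
    obtain ⟨hii0, hii1⟩ := PySem.List.mem_pyRange_one.1 hmem
    refine pvFoldl_shape _ _ _ _ ?_ r hsh
    intro r' jj hmemj hsh'
    dsimp only
    by_cases h1 : pvCell g ii jj ≠ pvBg g
    · rw [if_pos h1]
      exact pvShape_write r' _ _ _ ii jj _ hsh' hii0 hii1
    · rw [if_neg h1]
      exact hsh'
  case hstep =>
    intro r ii i' j' hmem hsh hi' hj'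
    obtain ⟨hii0, hii1⟩ := PySem.List.mem_pyRange_one.1 hmem
    refine pvFoldl_char (PySem.List.pyRange 0 ((g.headD []).length : Int) 1) _ g.length
      (g.headD []).length (fun i j => pvCell g i j)
      (fun jj i j => decide ((pvCell g ii jj ≠ pvBg g ∧ pvEdge g ii jj = true) ∧
        ii = (i : Int) ∧ jj = (j : Int))) ?_ ?_ r hsh i' j' hi' hj'
    · intro r' jj hmemj hsh'
      dsimp only
      by_cases h1 : pvCell g ii jj ≠ pvBg g
      · rw [if_pos h1]
        exact pvShape_write r' _ _ _ ii jj _ hsh' hii0 hii1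
      · rw [if_neg h1]
        exact hsh'
    · intro r' jj i j hmemj hsh' hi'' hj''
      obtain ⟨hjj0, hjj1⟩ := PySem.List.mem_pyRange_one.1 hmemj
      dsimp only
      by_cases h1 : pvCell g ii jj ≠ pvBg g
      · rw [if_pos h1,
          pvGetC_writeCell g r' _ _ _ ii jj hsh' hii0 hii1 hjj0 hjj1 i j hi'' hj'']
        simp [h1, pvEdge]
      · rw [if_neg h1]
        simp [h1]

-- single-write pass (B's two border passes)
theorem pvPass1_char (g : List (List Int)) (lo li : List Int)
    (hlo : ∀ ii ∈ lo, 0 ≤ ii ∧ ii < (g.length : Int))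
    (hli : ∀ jj ∈ li, 0 ≤ jj ∧ jj < ((g.headD []).length : Int))
    (r : List (List Int)) (hr : pvShape r g.length (g.headD []).length)
    (i j : Nat) (hi : i < g.length) (hj : j < (g.headD []).length) :
    pvGetC (lo.foldl (fun result ii =>
      li.foldl (fun result jj =>
        if pvCell g ii jj ≠ pvBg g then pvSet2 result ii jj (pvCell g ii jj) else result)
        result) r) i j =
      if (lo.any fun ii => li.any fun jj =>
          decide (pvCell g ii jj ≠ pvBg g ∧ ii = (i : Int) ∧ jj = (j : Int)))
      then pvCell g i j else pvGetC r i j := by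
  refine pvFoldl_char lo _ g.length (g.headD []).length (fun i j => pvCell g i j)
    (fun ii i j => li.any fun jj =>
      decide (pvCell g ii jj ≠ pvBg g ∧ ii = (i : Int) ∧ jj = (j : Int)))
    ?_ ?_ r hr i j hi hj
  · intro r' ii hmem hsh
    obtain ⟨hii0, hii1⟩ := hlo ii hmem
    refine pvFoldl_shape _ _ _ _ ?_ r' hsh
    intro r'' jj hmemj hsh'
    dsimp only
    exact pvShape_write r'' _ _ _ ii jj _ hsh' hii0 hii1
  · intro r' ii i' j' hmem hsh hi' hj'
    obtain ⟨hii0, hii1⟩ := hlo ii hmem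
    refine pvFoldl_char li _ g.length (g.headD []).length (fun i j => pvCell g i j)
      (fun jj i j => decide (pvCell g ii jj ≠ pvBg g ∧ ii = (i : Int) ∧ jj = (j : Int)))
      ?_ ?_ r' hsh i' j' hi' hj'
    · intro r'' jj hmemj hsh'
      dsimp only
      exact pvShape_write r'' _ _ _ ii jj _ hsh' hii0 hii1
    · intro r'' jj i'' j'' hmemj hsh' hi'' hj''
      obtain ⟨hjj0, hjj1⟩ := hli jj hmemj
      dsimp only
      rw [pvGetC_writeCell g r'' g.length (g.headD []).length _ ii jj hsh' hii0 hii1 hjj0 hjj1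
        i'' j'' hi'' hj'']
      simp

theorem pvPass1_shape (g : List (List Int)) (lo li : List Int)
    (hlo : ∀ ii ∈ lo, 0 ≤ ii ∧ ii < (g.length : Int))
    (r : List (List Int)) (hr : pvShape r g.length (g.headD []).length) :
    pvShape (lo.foldl (fun result ii =>
      li.foldl (fun result jj =>
        if pvCell g ii jj ≠ pvBg g then pvSet2 result ii jj (pvCell g ii jj) else result)
        result) r) g.length (g.headD []).length := by
  refine pvFoldl_shape _ _ _ _ ?_ r hr
  intro r' ii hmem hsh
  obtain ⟨hii0, hii1⟩ := hlo ii hmem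
  refine pvFoldl_shape _ _ _ _ ?_ r' hsh
  intro r'' jj hmemj hsh'
  dsimp only
  exact pvShape_write r'' _ _ _ ii jj _ hsh' hii0 hii1

-- horizontal pair pass
theorem pvPassH_char (g : List (List Int))
    (r : List (List Int)) (hr : pvShape r g.length (g.headD []).length)
    (i j : Nat) (hi : i < g.length) (hj : j < (g.headD []).length) :
    pvGetC ((PySem.List.pyRange 0 (g.length : Int) 1).foldl (fun result ii =>
      (PySem.List.pyRange 0 (((g.headD []).length : Int) - 1) 1).foldl (fun result jj =>
        if pvCell g ii jj ≠ pvCell g ii (jj + 1) then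
          if pvCell g ii (jj + 1) ≠ pvBg g then
            pvSet2 (if pvCell g ii jj ≠ pvBg g then pvSet2 result ii jj (pvCell g ii jj) else result)
              ii (jj + 1) (pvCell g ii (jj + 1))
          else
            if pvCell g ii jj ≠ pvBg g then pvSet2 result ii jj (pvCell g ii jj) else result
        else result) result) r) i j =
      if ((PySem.List.pyRange 0 (g.length : Int) 1).any fun ii =>
          (PySem.List.pyRange 0 (((g.headD []).length : Int) - 1) 1).any fun jj =>
            decide (pvCell g ii jj ≠ pvCell g ii (jj + 1) ∧
              ((pvCell g ii (jj + 1) ≠ pvBg g ∧ ii = (i : Int) ∧ jj + 1 = (j : Int)) ∨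
               (pvCell g ii jj ≠ pvBg g ∧ ii = (i : Int) ∧ jj = (j : Int)))))
      then pvCell g i j else pvGetC r i j := by
  refine pvFoldl_char _ _ g.length (g.headD []).length (fun i j => pvCell g i j)
    (fun ii i j => (PySem.List.pyRange 0 (((g.headD []).length : Int) - 1) 1).any fun jj =>
      decide (pvCell g ii jj ≠ pvCell g ii (jj + 1) ∧
        ((pvCell g ii (jj + 1) ≠ pvBg g ∧ ii = (i : Int) ∧ jj + 1 = (j : Int)) ∨
         (pvCell g ii jj ≠ pvBg g ∧ ii = (i : Int) ∧ jj = (j : Int)))))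
    ?_ ?_ r hr i j hi hj
  · intro r' ii hmem hsh
    obtain ⟨hii0, hii1⟩ := PySem.List.mem_pyRange_one.1 hmem
    refine pvFoldl_shape _ _ _ _ ?_ r' hsh
    intro r'' jj hmemj hsh'
    dsimp only
    by_cases hab : pvCell g ii jj ≠ pvCell g ii (jj + 1)
    · rw [if_pos hab]
      by_cases hb1 : pvCell g ii (jj + 1) ≠ pvBg g
      · rw [if_pos hb1]
        exact pvShape_set2 _ _ _ ii (jj + 1) _ (pvShape_write r'' _ _ _ ii jj _ hsh' hii0 hii1)
          hii0 hii1
      · rw [if_neg hb1]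
        exact pvShape_write r'' _ _ _ ii jj _ hsh' hii0 hii1
    · rw [if_neg hab]
      exact hsh'
  · intro r' ii i' j' hmem hsh hi' hj'
    obtain ⟨hii0, hii1⟩ := PySem.List.mem_pyRange_one.1 hmem
    refine pvFoldl_char _ _ g.length (g.headD []).length (fun i j => pvCell g i j)
      (fun jj i j => decide (pvCell g ii jj ≠ pvCell g ii (jj + 1) ∧
        ((pvCell g ii (jj + 1) ≠ pvBg g ∧ ii = (i : Int) ∧ jj + 1 = (j : Int)) ∨
         (pvCell g ii jj ≠ pvBg g ∧ ii = (i : Int) ∧ jj = (j : Int)))))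
      ?_ ?_ r' hsh i' j' hi' hj'
    · intro r'' jj hmemj hsh'
      obtain ⟨hjj0, hjj1⟩ := PySem.List.mem_pyRange_one.1 hmemj
      by_cases hab : pvCell g ii jj ≠ pvCell g ii (jj + 1)
      · rw [if_pos hab]
        by_cases hb1 : pvCell g ii (jj + 1) ≠ pvBg g
        · rw [if_pos hb1]
          exact pvShape_set2 _ _ _ ii (jj + 1) _
            (pvShape_write r'' _ _ _ ii jj _ hsh' hii0 hii1) hii0 hii1
        · rw [if_neg hb1]
          exact pvShape_write r'' _ _ _ ii jj _ hsh' hii0 hii1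
      · rw [if_neg hab]
        exact hsh'
    · intro r'' jj i'' j'' hmemj hsh' hi'' hj''
      obtain ⟨hjj0, hjj1⟩ := PySem.List.mem_pyRange_one.1 hmemj
      dsimp only
      by_cases hab : pvCell g ii jj ≠ pvCell g ii (jj + 1)
      · rw [if_pos hab]
        have hsh2 : pvShape (if pvCell g ii jj ≠ pvBg g then
            pvSet2 r'' ii jj (pvCell g ii jj) else r'') g.length (g.headD []).length :=
          pvShape_write r'' _ _ _ ii jj _ hsh' hii0 hii1
        have hw2 := pvGetC_writeCell g
          (if pvCell g ii jj ≠ pvBg g then pvSet2 r'' ii jj (pvCell g ii jj) else r'')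
          g.length (g.headD []).length (pvCell g ii (jj + 1) ≠ pvBg g) ii (jj + 1) hsh2
          hii0 hii1 (by omega) (by omega) i'' j'' hi'' hj''
        rw [show (if pvCell g ii (jj + 1) ≠ pvBg g then
              pvSet2 (if pvCell g ii jj ≠ pvBg g then pvSet2 r'' ii jj (pvCell g ii jj) else r'')
                ii (jj + 1) (pvCell g ii (jj + 1))
            else if pvCell g ii jj ≠ pvBg g then pvSet2 r'' ii jj (pvCell g ii jj) else r'') =
            (if pvCell g ii (jj + 1) ≠ pvBg g then
              pvSet2 (if pvCell g ii jj ≠ pvBg g then pvSet2 r'' ii jj (pvCell g ii jj) else r'')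
                ii (jj + 1) (pvCell g ii (jj + 1))
            else if pvCell g ii jj ≠ pvBg g then pvSet2 r'' ii jj (pvCell g ii jj) else r'')
          from rfl, hw2,
          pvGetC_writeCell g r'' g.length (g.headD []).length _ ii jj hsh' hii0 hii1 hjj0
            (by omega) i'' j'' hi'' hj'', pvIte_or]
        simp [hab]
      · rw [if_neg hab]
        simp [hab]

theorem pvPassH_shape (g : List (List Int))
    (r : List (List Int)) (hr : pvShape r g.length (g.headD []).length) :
    pvShape ((PySem.List.pyRange 0 (g.length : Int) 1).foldl (fun result ii =>
      (PySem.List.pyRange 0 (((g.headD []).length : Int) - 1) 1).foldl (fun result jj =>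
        if pvCell g ii jj ≠ pvCell g ii (jj + 1) then
          if pvCell g ii (jj + 1) ≠ pvBg g then
            pvSet2 (if pvCell g ii jj ≠ pvBg g then pvSet2 result ii jj (pvCell g ii jj) else result)
              ii (jj + 1) (pvCell g ii (jj + 1))
          else
            if pvCell g ii jj ≠ pvBg g then pvSet2 result ii jj (pvCell g ii jj) else result
        else result) result) r) g.length (g.headD []).length := by
  refine pvFoldl_shape _ _ _ _ ?_ r hr
  intro r' ii hmem hsh
  obtain ⟨hii0, hii1⟩ := PySem.List.mem_pyRange_one.1 hmem
  refine pvFoldl_shape _ _ _ _ ?_ r' hsh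
  intro r'' jj hmemj hsh'
  dsimp only
  by_cases hab : pvCell g ii jj ≠ pvCell g ii (jj + 1)
  · rw [if_pos hab]
    by_cases hb1 : pvCell g ii (jj + 1) ≠ pvBg g
    · rw [if_pos hb1]
      exact pvShape_set2 _ _ _ ii (jj + 1) _
        (pvShape_write r'' _ _ _ ii jj _ hsh' hii0 hii1) hii0 hii1
    · rw [if_neg hb1]
      exact pvShape_write r'' _ _ _ ii jj _ hsh' hii0 hii1
  · rw [if_neg hab]
    exact hsh'

-- vertical pair pass
theorem pvPassV_char (g : List (List Int))
    (r : List (List Int)) (hr : pvShape r g.length (g.headD []).length)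
    (i j : Nat) (hi : i < g.length) (hj : j < (g.headD []).length) :
    pvGetC ((PySem.List.pyRange 0 ((g.length : Int) - 1) 1).foldl (fun result ii =>
      (PySem.List.pyRange 0 ((g.headD []).length : Int) 1).foldl (fun result jj =>
        if pvCell g ii jj ≠ pvCell g (ii + 1) jj then
          if pvCell g (ii + 1) jj ≠ pvBg g then
            pvSet2 (if pvCell g ii jj ≠ pvBg g then pvSet2 result ii jj (pvCell g ii jj) else result)
              (ii + 1) jj (pvCell g (ii + 1) jj)
          else
            if pvCell g ii jj ≠ pvBg g then pvSet2 result ii jj (pvCell g ii jj) else result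
        else result) result) r) i j =
      if ((PySem.List.pyRange 0 ((g.length : Int) - 1) 1).any fun ii =>
          (PySem.List.pyRange 0 ((g.headD []).length : Int) 1).any fun jj =>
            decide (pvCell g ii jj ≠ pvCell g (ii + 1) jj ∧
              ((pvCell g (ii + 1) jj ≠ pvBg g ∧ ii + 1 = (i : Int) ∧ jj = (j : Int)) ∨
               (pvCell g ii jj ≠ pvBg g ∧ ii = (i : Int) ∧ jj = (j : Int)))))
      then pvCell g i j else pvGetC r i j := by
  refine pvFoldl_char _ _ g.length (g.headD []).length (fun i j => pvCell g i j)
    (fun ii i j => (PySem.List.pyRange 0 ((g.headD []).length : Int) 1).any fun jj =>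
      decide (pvCell g ii jj ≠ pvCell g (ii + 1) jj ∧
        ((pvCell g (ii + 1) jj ≠ pvBg g ∧ ii + 1 = (i : Int) ∧ jj = (j : Int)) ∨
         (pvCell g ii jj ≠ pvBg g ∧ ii = (i : Int) ∧ jj = (j : Int)))))
    ?_ ?_ r hr i j hi hj
  · intro r' ii hmem hsh
    obtain ⟨hii0, hii1⟩ := PySem.List.mem_pyRange_one.1 hmem
    refine pvFoldl_shape _ _ _ _ ?_ r' hsh
    intro r'' jj hmemj hsh'
    dsimp only
    by_cases hab : pvCell g ii jj ≠ pvCell g (ii + 1) jj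
    · rw [if_pos hab]
      by_cases hb1 : pvCell g (ii + 1) jj ≠ pvBg g
      · rw [if_pos hb1]
        exact pvShape_set2 _ _ _ (ii + 1) jj _
          (pvShape_write r'' _ _ _ ii jj _ hsh' hii0 (by omega)) (by omega) (by omega)
      · rw [if_neg hb1]
        exact pvShape_write r'' _ _ _ ii jj _ hsh' hii0 (by omega)
    · rw [if_neg hab]
      exact hsh'
  · intro r' ii i' j' hmem hsh hi' hj'
    obtain ⟨hii0, hii1⟩ := PySem.List.mem_pyRange_one.1 hmem
    refine pvFoldl_char _ _ g.length (g.headD []).length (fun i j => pvCell g i j)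
      (fun jj i j => decide (pvCell g ii jj ≠ pvCell g (ii + 1) jj ∧
        ((pvCell g (ii + 1) jj ≠ pvBg g ∧ ii + 1 = (i : Int) ∧ jj = (j : Int)) ∨
         (pvCell g ii jj ≠ pvBg g ∧ ii = (i : Int) ∧ jj = (j : Int)))))
      ?_ ?_ r' hsh i' j' hi' hj'
    · intro r'' jj hmemj hsh'
      obtain ⟨hjj0, hjj1⟩ := PySem.List.mem_pyRange_one.1 hmemj
      by_cases hab : pvCell g ii jj ≠ pvCell g (ii + 1) jj
      · rw [if_pos hab]
        by_cases hb1 : pvCell g (ii + 1) jj ≠ pvBg g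
        · rw [if_pos hb1]
          exact pvShape_set2 _ _ _ (ii + 1) jj _
            (pvShape_write r'' _ _ _ ii jj _ hsh' hii0 (by omega)) (by omega) (by omega)
        · rw [if_neg hb1]
          exact pvShape_write r'' _ _ _ ii jj _ hsh' hii0 (by omega)
      · rw [if_neg hab]
        exact hsh'
    · intro r'' jj i'' j'' hmemj hsh' hi'' hj''
      obtain ⟨hjj0, hjj1⟩ := PySem.List.mem_pyRange_one.1 hmemj
      dsimp only
      by_cases hab : pvCell g ii jj ≠ pvCell g (ii + 1) jj
      · rw [if_pos hab]
        have hsh2 : pvShape (if pvCell g ii jj ≠ pvBg g then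
            pvSet2 r'' ii jj (pvCell g ii jj) else r'') g.length (g.headD []).length :=
          pvShape_write r'' _ _ _ ii jj _ hsh' hii0 (by omega)
        have hw2 := pvGetC_writeCell g
          (if pvCell g ii jj ≠ pvBg g then pvSet2 r'' ii jj (pvCell g ii jj) else r'')
          g.length (g.headD []).length (pvCell g (ii + 1) jj ≠ pvBg g) (ii + 1) jj hsh2
          (by omega) (by omega) hjj0 hjj1 i'' j'' hi'' hj''
        rw [hw2,
          pvGetC_writeCell g r'' g.length (g.headD []).length _ ii jj hsh' hii0 (by omega)
            hjj0 hjj1 i'' j'' hi'' hj'', pvIte_or]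
        simp [hab]
      · rw [if_neg hab]
        simp [hab]

theorem pvPassV_shape (g : List (List Int))
    (r : List (List Int)) (hr : pvShape r g.length (g.headD []).length) :
    pvShape ((PySem.List.pyRange 0 ((g.length : Int) - 1) 1).foldl (fun result ii =>
      (PySem.List.pyRange 0 ((g.headD []).length : Int) 1).foldl (fun result jj =>
        if pvCell g ii jj ≠ pvCell g (ii + 1) jj then
          if pvCell g (ii + 1) jj ≠ pvBg g then
            pvSet2 (if pvCell g ii jj ≠ pvBg g then pvSet2 result ii jj (pvCell g ii jj) else result)
              (ii + 1) jj (pvCell g (ii + 1) jj)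
          else
            if pvCell g ii jj ≠ pvBg g then pvSet2 result ii jj (pvCell g ii jj) else result
        else result) result) r) g.length (g.headD []).length := by
  refine pvFoldl_shape _ _ _ _ ?_ r hr
  intro r' ii hmem hsh
  obtain ⟨hii0, hii1⟩ := PySem.List.mem_pyRange_one.1 hmem
  refine pvFoldl_shape _ _ _ _ ?_ r' hsh
  intro r'' jj hmemj hsh'
  dsimp only
  by_cases hab : pvCell g ii jj ≠ pvCell g (ii + 1) jj
  · rw [if_pos hab]
    by_cases hb1 : pvCell g (ii + 1) jj ≠ pvBg g
    · rw [if_pos hb1]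
      exact pvShape_set2 _ _ _ (ii + 1) jj _
        (pvShape_write r'' _ _ _ ii jj _ hsh' hii0 (by omega)) (by omega) (by omega)
    · rw [if_neg hb1]
      exact pvShape_write r'' _ _ _ ii jj _ hsh' hii0 (by omega)
  · rw [if_neg hab]
    exact hsh'

theorem pvCharB (g : List (List Int))
    (hne : ¬(g = [] ∨ g.headD [] = []))
    (i j : Nat) (hi : i < g.length) (hj : j < (g.headD []).length) :
    pvGetC (outline_objects_alt g) i j =
      if ((((PySem.List.pyRange 0 ((g.length : Int) - 1) 1).any fun ii =>
              (PySem.List.pyRange 0 ((g.headD []).length : Int) 1).any fun jj =>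
                decide (pvCell g ii jj ≠ pvCell g (ii + 1) jj ∧
                  ((pvCell g (ii + 1) jj ≠ pvBg g ∧ ii + 1 = (i : Int) ∧ jj = (j : Int)) ∨
                   (pvCell g ii jj ≠ pvBg g ∧ ii = (i : Int) ∧ jj = (j : Int))))) = true ∨
            ((PySem.List.pyRange 0 (g.length : Int) 1).any fun ii =>
              (PySem.List.pyRange 0 (((g.headD []).length : Int) - 1) 1).any fun jj =>
                decide (pvCell g ii jj ≠ pvCell g ii (jj + 1) ∧
                  ((pvCell g ii (jj + 1) ≠ pvBg g ∧ ii = (i : Int) ∧ jj + 1 = (j : Int)) ∨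
                   (pvCell g ii jj ≠ pvBg g ∧ ii = (i : Int) ∧ jj = (j : Int))))) = true) ∨
          ((PySem.List.pyRange 0 (g.length : Int) 1).any fun ii =>
            [(0 : Int), ((g.headD []).length : Int) - 1].any fun jj =>
              decide (pvCell g ii jj ≠ pvBg g ∧ ii = (i : Int) ∧ jj = (j : Int))) = true) ∨
        ([(0 : Int), (g.length : Int) - 1].any fun ii =>
          (PySem.List.pyRange 0 ((g.headD []).length : Int) 1).any fun jj =>
            decide (pvCell g ii jj ≠ pvBg g ∧ ii = (i : Int) ∧ jj = (j : Int))) = true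
      then pvCell g i j else pvBg g := by
  have hg : g ≠ [] := fun h => hne (Or.inl h)
  have hh : g.headD [] ≠ [] := fun h => hne (Or.inr h)
  have hR : 0 < g.length := List.length_pos_of_ne_nil hg
  have hC : 0 < (g.headD []).length := List.length_pos_of_ne_nil hh
  have hmemR : ∀ ii ∈ PySem.List.pyRange 0 (g.length : Int) 1,
      0 ≤ ii ∧ ii < (g.length : Int) := fun ii h => PySem.List.mem_pyRange_one.1 h
  have hmemC : ∀ jj ∈ PySem.List.pyRange 0 ((g.headD []).length : Int) 1,
      0 ≤ jj ∧ jj < ((g.headD []).length : Int) := fun jj h => PySem.List.mem_pyRange_one.1 h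
  have hmem2 : ∀ ii ∈ [(0 : Int), (g.length : Int) - 1], 0 ≤ ii ∧ ii < (g.length : Int) := by
    intro ii h
    simp only [List.mem_cons, List.not_mem_nil, or_false] at h
    rcases h with rfl | rfl <;> omega
  have hmemC2 : ∀ jj ∈ [(0 : Int), ((g.headD []).length : Int) - 1],
      0 ≤ jj ∧ jj < ((g.headD []).length : Int) := by
    intro jj h
    simp only [List.mem_cons, List.not_mem_nil, or_false] at h
    rcases h with rfl | rfl <;> omega
  have hinit : pvShape (List.replicate ((g.length : Int)).toNat
      (List.replicate ((((g.headD []).length : Int))).toNat (pvBg g)))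
      g.length (g.headD []).length := by
    constructor
    · simp
    · intro row h
      rw [List.eq_of_mem_replicate h]
      simp
  unfold outline_objects_alt
  rw [if_neg hne]
  dsimp only
  refine Eq.trans (pvPassV_char g _
    (pvPassH_shape g _
      (pvPass1_shape g _ _ hmemR _
        (pvPass1_shape g _ _ hmem2 _ hinit))) i j hi hj) ?_
  rw [pvPassH_char g _ (pvPass1_shape g _ _ hmemR _ (pvPass1_shape g _ _ hmem2 _ hinit))
      i j hi hj,
    pvPass1_char g _ _ hmemR hmemC2 _ (pvPass1_shape g _ _ hmem2 _ hinit) i j hi hj,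
    pvPass1_char g _ _ hmem2 hmemC _ hinit i j hi hj,
    pvGetC_init ((g.length : Int)).toNat (((g.headD []).length : Int)).toNat (pvBg g) i j
      (by omega) (by omega),
    pvIte_or, pvIte_or, pvIte_or]

theorem pvShapeA (g : List (List Int)) (hne : ¬(g = [] ∨ g.headD [] = [])) :
    pvShape (outline_objects g) g.length (g.headD []).length := by
  unfold outline_objects
  rw [if_neg hne]
  dsimp only
  refine pvFoldl_shape _ _ _ _ ?_ _ ?init
  case init =>
    constructor
    · simp
    · intro row h
      rw [List.eq_of_mem_replicate h]
      simp
  intro r ii hmem hsh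
  obtain ⟨hii0, hii1⟩ := PySem.List.mem_pyRange_one.1 hmem
  refine pvFoldl_shape _ _ _ _ ?_ r hsh
  intro r' jj hmemj hsh'
  dsimp only
  by_cases h1 : pvCell g ii jj ≠ pvBg g
  · rw [if_pos h1]
    exact pvShape_write r' _ _ _ ii jj _ hsh' hii0 hii1
  · rw [if_neg h1]
    exact hsh'

theorem pvShapeB (g : List (List Int)) (hne : ¬(g = [] ∨ g.headD [] = [])) :
    pvShape (outline_objects_alt g) g.length (g.headD []).length := by
  have hg : g ≠ [] := fun h => hne (Or.inl h)
  have hh : g.headD [] ≠ [] := fun h => hne (Or.inr h)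
  have hR : 0 < g.length := List.length_pos_of_ne_nil hg
  have hC : 0 < (g.headD []).length := List.length_pos_of_ne_nil hh
  have hmemR : ∀ ii ∈ PySem.List.pyRange 0 (g.length : Int) 1,
      0 ≤ ii ∧ ii < (g.length : Int) := fun ii h => PySem.List.mem_pyRange_one.1 h
  have hmem2 : ∀ ii ∈ [(0 : Int), (g.length : Int) - 1], 0 ≤ ii ∧ ii < (g.length : Int) := by
    intro ii h
    simp only [List.mem_cons, List.not_mem_nil, or_false] at h
    rcases h with rfl | rfl <;> omega
  have hinit : pvShape (List.replicate ((g.length : Int)).toNat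
      (List.replicate ((((g.headD []).length : Int))).toNat (pvBg g)))
      g.length (g.headD []).length := by
    constructor
    · simp
    · intro row h
      rw [List.eq_of_mem_replicate h]
      simp
  unfold outline_objects_alt
  rw [if_neg hne]
  dsimp only
  exact pvPassV_shape g _
    (pvPassH_shape g _
      (pvPass1_shape g _ _ hmemR _
        (pvPass1_shape g _ _ hmem2 _ hinit)))

theorem pvShape_ext (r r' : List (List Int)) (R C : Nat)
    (h1 : pvShape r R C) (h2 : pvShape r' R C)
    (h : ∀ i j, i < R → j < C → pvGetC r i j = pvGetC r' i j) : r = r' := by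
  obtain ⟨hl1, hr1⟩ := h1
  obtain ⟨hl2, hr2⟩ := h2
  apply List.ext_getElem (by omega)
  intro n hn hn'
  have hrow1 : r[n].length = C := hr1 _ (List.getElem_mem hn)
  have hrow2 : r'[n].length = C := hr2 _ (List.getElem_mem hn')
  apply List.ext_getElem (by omega)
  intro m hm hm'
  have := h n m (by omega) (by omega)
  unfold pvGetC at this
  rwa [List.getD_eq_getElem r [] hn, List.getD_eq_getElem r' [] hn',
    List.getD_eq_getElem _ 0 (by omega), List.getD_eq_getElem _ 0 (by omega)] at this

theorem pvCond_iff (g : List (List Int))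
    (hne : ¬(g = [] ∨ g.headD [] = []))
    (i j : Nat) (hi : i < g.length) (hj : j < (g.headD []).length) :
    ((PySem.List.pyRange 0 (g.length : Int) 1).any fun ii =>
        (PySem.List.pyRange 0 ((g.headD []).length : Int) 1).any fun jj =>
          decide ((pvCell g ii jj ≠ pvBg g ∧ pvEdge g ii jj = true) ∧
            ii = (i : Int) ∧ jj = (j : Int))) = true ↔
      ((((PySem.List.pyRange 0 ((g.length : Int) - 1) 1).any fun ii =>
              (PySem.List.pyRange 0 ((g.headD []).length : Int) 1).any fun jj =>
                decide (pvCell g ii jj ≠ pvCell g (ii + 1) jj ∧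
                  ((pvCell g (ii + 1) jj ≠ pvBg g ∧ ii + 1 = (i : Int) ∧ jj = (j : Int)) ∨
                   (pvCell g ii jj ≠ pvBg g ∧ ii = (i : Int) ∧ jj = (j : Int))))) = true ∨
            ((PySem.List.pyRange 0 (g.length : Int) 1).any fun ii =>
              (PySem.List.pyRange 0 (((g.headD []).length : Int) - 1) 1).any fun jj =>
                decide (pvCell g ii jj ≠ pvCell g ii (jj + 1) ∧
                  ((pvCell g ii (jj + 1) ≠ pvBg g ∧ ii = (i : Int) ∧ jj + 1 = (j : Int)) ∨
                   (pvCell g ii jj ≠ pvBg g ∧ ii = (i : Int) ∧ jj = (j : Int))))) = true) ∨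
          ((PySem.List.pyRange 0 (g.length : Int) 1).any fun ii =>
            [(0 : Int), ((g.headD []).length : Int) - 1].any fun jj =>
              decide (pvCell g ii jj ≠ pvBg g ∧ ii = (i : Int) ∧ jj = (j : Int))) = true) ∨
        ([(0 : Int), (g.length : Int) - 1].any fun ii =>
          (PySem.List.pyRange 0 ((g.headD []).length : Int) 1).any fun jj =>
            decide (pvCell g ii jj ≠ pvBg g ∧ ii = (i : Int) ∧ jj = (j : Int))) = true := by
  have hR : 0 < g.length := List.length_pos_of_ne_nil (fun h => hne (Or.inl h))
  have hC : 0 < (g.headD []).length := List.length_pos_of_ne_nil (fun h => hne (Or.inr h))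
  simp only [List.any_eq_true, List.any_cons, List.any_nil, Bool.or_eq_true,
    decide_eq_true_eq, PySem.List.mem_pyRange_one, pvEdge,
    Bool.false_eq_true, or_false, add_zero]
  constructor
  · rintro ⟨ii, ⟨h0, h1⟩, jj, ⟨h2, h3⟩, ⟨hcbg, hedge⟩, rfl, rfl⟩
    rcases hedge with
      ((((ha | ha) | ha) | ha) | ha) | ((((hb | hb) | hb) | hb) | hb) |
        ((((hc | hc) | hc) | hc) | hc) | ((((hd | hd) | hd) | hd) | hd)
    · -- up, out of grid: i = 0
      refine Or.inr (Or.inl ⟨(j : Int), ⟨by omega, by omega⟩, ?_⟩)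
      rw [show (0 : Int) = (i : Int) from by omega]
      exact ⟨hcbg, rfl, rfl⟩
    · exact absurd ha (by omega)
    · exact absurd ha (by omega)
    · exact absurd ha (by omega)
    · -- up, different colour
      by_cases hz : i = 0
      · refine Or.inr (Or.inl ⟨(j : Int), ⟨by omega, by omega⟩, ?_⟩)
        rw [show (0 : Int) = (i : Int) from by omega]
        exact ⟨hcbg, rfl, rfl⟩
      · refine Or.inl (Or.inl (Or.inl
          ⟨(i : Int) + -1, ⟨by omega, by omega⟩, (j : Int), ⟨by omega, by omega⟩, ?_⟩))
        rw [show (i : Int) + -1 + 1 = (i : Int) from by ring]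
        exact ⟨ha, Or.inl ⟨hcbg, rfl, rfl⟩⟩
    · exact absurd hb (by omega)
    · -- down, out of grid: i = rows - 1
      refine Or.inr (Or.inr ⟨(j : Int), ⟨by omega, by omega⟩, ?_⟩)
      rw [show (g.length : Int) - 1 = (i : Int) from by omega]
      exact ⟨hcbg, rfl, rfl⟩
    · exact absurd hb (by omega)
    · exact absurd hb (by omega)
    · -- down, different colour
      by_cases hz : (i : Int) = (g.length : Int) - 1
      · refine Or.inr (Or.inr ⟨(j : Int), ⟨by omega, by omega⟩, ?_⟩)
        rw [show (g.length : Int) - 1 = (i : Int) from by omega]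
        exact ⟨hcbg, rfl, rfl⟩
      · refine Or.inl (Or.inl (Or.inl
          ⟨(i : Int), ⟨by omega, by omega⟩, (j : Int), ⟨by omega, by omega⟩, ?_⟩))
        exact ⟨Ne.symm hb, Or.inr ⟨hcbg, rfl, rfl⟩⟩
    · exact absurd hc (by omega)
    · exact absurd hc (by omega)
    · -- left, out of grid: j = 0
      refine Or.inl (Or.inr ⟨(i : Int), ⟨by omega, by omega⟩, Or.inl ?_⟩)
      rw [show (0 : Int) = (j : Int) from by omega]
      exact ⟨hcbg, rfl, rfl⟩
    · exact absurd hc (by omega)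
    · -- left, different colour
      by_cases hz : j = 0
      · refine Or.inl (Or.inr ⟨(i : Int), ⟨by omega, by omega⟩, Or.inl ?_⟩)
        rw [show (0 : Int) = (j : Int) from by omega]
        exact ⟨hcbg, rfl, rfl⟩
      · refine Or.inl (Or.inl (Or.inr
          ⟨(i : Int), ⟨by omega, by omega⟩, (j : Int) + -1, ⟨by omega, by omega⟩, ?_⟩))
        rw [show (j : Int) + -1 + 1 = (j : Int) from by ring]
        exact ⟨hc, Or.inl ⟨hcbg, rfl, rfl⟩⟩
    · exact absurd hd (by omega)
    · exact absurd hd (by omega)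
    · exact absurd hd (by omega)
    · -- right, out of grid: j = cols - 1
      refine Or.inl (Or.inr ⟨(i : Int), ⟨by omega, by omega⟩, Or.inr ?_⟩)
      rw [show ((g.headD []).length : Int) - 1 = (j : Int) from by omega]
      exact ⟨hcbg, rfl, rfl⟩
    · -- right, different colour
      by_cases hz : (j : Int) = ((g.headD []).length : Int) - 1
      · refine Or.inl (Or.inr ⟨(i : Int), ⟨by omega, by omega⟩, Or.inr ?_⟩)
        rw [show ((g.headD []).length : Int) - 1 = (j : Int) from by omega]
        exact ⟨hcbg, rfl, rfl⟩
      · refine Or.inl (Or.inl (Or.inr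
          ⟨(i : Int), ⟨by omega, by omega⟩, (j : Int), ⟨by omega, by omega⟩, ?_⟩))
        exact ⟨Ne.symm hd, Or.inr ⟨hcbg, rfl, rfl⟩⟩
  · rintro (((h | h) | h) | h)
    · -- vertical pair pass
      obtain ⟨x, ⟨hx0, hx1⟩, y, ⟨hy0, hy1⟩, hnab, hcl⟩ := h
      rcases hcl with ⟨hb, hx1', rfl⟩ | ⟨ha, rfl, rfl⟩
      · refine ⟨(i : Int), ⟨by omega, by omega⟩, (j : Int), ⟨by omega, by omega⟩,
          ⟨⟨?_, Or.inl (Or.inr ?_)⟩, rfl, rfl⟩⟩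
        · rwa [hx1'] at hb
        · rw [show (i : Int) + -1 = x from by omega]
          rwa [hx1'] at hnab
      · exact ⟨(i : Int), ⟨by omega, by omega⟩, (j : Int), ⟨by omega, by omega⟩,
          ⟨⟨ha, Or.inr (Or.inl (Or.inr (Ne.symm hnab)))⟩, rfl, rfl⟩⟩
    · -- horizontal pair pass
      obtain ⟨x, ⟨hx0, hx1⟩, y, ⟨hy0, hy1⟩, hnab, hcl⟩ := h
      rcases hcl with ⟨hb, rfl, hy1'⟩ | ⟨ha, rfl, rfl⟩
      · refine ⟨(i : Int), ⟨by omega, by omega⟩, (j : Int), ⟨by omega, by omega⟩,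
          ⟨⟨?_, Or.inr (Or.inr (Or.inl (Or.inr ?_)))⟩, rfl, rfl⟩⟩
        · rwa [hy1'] at hb
        · rw [show (j : Int) + -1 = y from by omega]
          rwa [hy1'] at hnab
      · exact ⟨(i : Int), ⟨by omega, by omega⟩, (j : Int), ⟨by omega, by omega⟩,
          ⟨⟨ha, Or.inr (Or.inr (Or.inr (Or.inr (Ne.symm hnab))))⟩, rfl, rfl⟩⟩
    · -- column border pass
      obtain ⟨x, ⟨hx0, hx1⟩, hcl⟩ := h
      rcases hcl with ⟨hb, rfl, h0j⟩ | ⟨hb, rfl, h1j⟩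
      · exact ⟨(i : Int), ⟨by omega, by omega⟩, (0 : Int), ⟨by omega, by omega⟩,
          ⟨⟨hb, Or.inr (Or.inr (Or.inl (Or.inl (Or.inl (Or.inr (by omega))))))⟩, rfl, h0j⟩⟩
      · exact ⟨(i : Int), ⟨by omega, by omega⟩, ((g.headD []).length : Int) - 1,
          ⟨by omega, by omega⟩,
          ⟨⟨hb, Or.inr (Or.inr (Or.inr (Or.inl (Or.inr (by omega)))))⟩, rfl, h1j⟩⟩
    · -- row border pass
      rcases h with ⟨y, ⟨hy0, hy1⟩, hb, h0i, rfl⟩ | ⟨y, ⟨hy0, hy1⟩, hb, h1i, rfl⟩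
      · exact ⟨(0 : Int), ⟨by omega, by omega⟩, (j : Int), ⟨by omega, by omega⟩,
          ⟨⟨hb, Or.inl (Or.inl (Or.inl (Or.inl (Or.inl (by omega)))))⟩, h0i, rfl⟩⟩
      · exact ⟨(g.length : Int) - 1, ⟨by omega, by omega⟩, (j : Int), ⟨by omega, by omega⟩,
          ⟨⟨hb, Or.inr (Or.inl (Or.inl (Or.inl (Or.inl (Or.inr (by omega))))))⟩, h1i, rfl⟩⟩

-- ===== VERDICT (by name: the statement is the Claim_ definition above) =====
theorem outline_objects_spec : Claim_equal_outline_objects := by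
  unfold Claim_equal_outline_objects Spec_outline_objects
  intro g _ _
  by_cases hne : g = [] ∨ g.headD [] = []
  · show outline_objects g = outline_objects_alt g
    unfold outline_objects outline_objects_alt
    rw [if_pos hne, if_pos hne]
  · refine pvShape_ext _ _ g.length (g.headD []).length (pvShapeA g hne) (pvShapeB g hne) ?_
    intro i j hi hj
    rw [pvCharA g hne i j hi hj, pvCharB g hne i j hi hj]
    exact if_congr (pvCond_iff g hne i j hi hj) rfl rfl
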